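-- pv_equiv track=rewrite | github.com/junjuning/Algorithm_python | Baekjoon/test/test05.py | count_groups_with_max_min_diff
-- ===== SOURCE A (Python) =====
-- def count_groups_with_max_min_diff(a, max_min_diff):
--     count = 1  # 첫번째 그룹은 항상 존재하므로 1로 초기화합니다.
--     curr_min, curr_max = a[0], a[0]
--     for num in a:
--         curr_min = min(curr_min, num)
--         curr_max = max(curr_max, num)
--         if curr_max - curr_min > max_min_diff:
--             curr_min, curr_max = num, num
--             count += 1
--     return count
-- ===== SOURCE B (Python) =====
-- def count_groups_with_max_min_diff(a, max_min_diff):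
--     count = 1
--     group = [a[0]]
--     for num in a:
--         group.append(num)
--         if max(group) - min(group) > max_min_diff:
--             count += 1
--             group = [num]
--     return count
-- ===== Notes on version B (the rewrite author's own statement) =====
-- stated objective: alternative
-- what changed: B maintains the current group as an explicit list and recomputes max(group)-min(group) by scanning it at each step, replacing A's running curr_min/curr_max scalar state; it trades O(n) state updates for per-step group scans.
-- outside the precondition, e.g. on count_groups_with_max_min_diff([], 0): A raises IndexError, B raises IndexError
import Mathlib
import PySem

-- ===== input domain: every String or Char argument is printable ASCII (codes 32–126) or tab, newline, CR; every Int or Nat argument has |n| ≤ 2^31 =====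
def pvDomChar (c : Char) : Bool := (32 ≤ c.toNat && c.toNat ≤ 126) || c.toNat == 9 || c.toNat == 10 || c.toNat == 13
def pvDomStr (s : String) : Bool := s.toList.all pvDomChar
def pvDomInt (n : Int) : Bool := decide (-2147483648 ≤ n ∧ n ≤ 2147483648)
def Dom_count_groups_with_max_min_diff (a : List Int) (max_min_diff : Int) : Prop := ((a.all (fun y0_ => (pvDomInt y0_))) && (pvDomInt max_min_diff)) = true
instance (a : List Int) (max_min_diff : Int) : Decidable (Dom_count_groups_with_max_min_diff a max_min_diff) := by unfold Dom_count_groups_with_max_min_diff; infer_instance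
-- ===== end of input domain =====

-- B replaces A's running curr_min/curr_max scalars by an explicit current-group list
-- rescanned with max/min at every step (alternative decomposition, not faster).

-- ===== PORT A =====
def count_groups_with_max_min_diff (a : List Int) (max_min_diff : Int) : Int :=
  match a with
  | [] => 0  -- unreachable: Python raises IndexError on a[0]; excluded by Pre_
  | h :: _ =>
    (a.foldl (fun (st : Int × Int × Int) num =>
        let mn := min st.2.1 num
        let mx := max st.2.2 num
        if mx - mn > max_min_diff then (st.1 + 1, num, num) else (st.1, mn, mx))
      (1, h, h)).1

-- ===== PORT B =====
def count_groups_with_max_min_diff_alt (a : List Int) (max_min_diff : Int) : Int :=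
  match a with
  | [] => 0  -- unreachable: Python raises IndexError on a[0]; excluded by Pre_
  | h :: _ =>
    (a.foldl (fun (st : Int × List Int) num =>
        let g := st.2 ++ [num]
        -- group is never empty, so the .getD 0 defaults never fire (max/min on a nonempty list)
        if ((PySem.List.max? g (fun y => y)).getD 0)
             - ((PySem.List.min? g (fun y => y)).getD 0) > max_min_diff then
          (st.1 + 1, [num])
        else (st.1, g))
      (1, [h])).1

-- ===== PRECONDITION & SPEC =====
-- Pre_ excludes only the empty list, on which both Pythons raise IndexError at a[0].
def Pre_count_groups_with_max_min_diff (a : List Int) (max_min_diff : Int) : Prop := a ≠ []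
instance (a : List Int) (max_min_diff : Int) : Decidable (Pre_count_groups_with_max_min_diff a max_min_diff) := by unfold Pre_count_groups_with_max_min_diff; infer_instance
def pvWitness_count_groups_with_max_min_diff : List Int × Int := ([1, 5, 2, 9], 3)

def Spec_count_groups_with_max_min_diff (a : List Int) (max_min_diff : Int) (out : Int) : Prop := out = count_groups_with_max_min_diff_alt a max_min_diff
instance (a : List Int) (max_min_diff : Int) (out : Int) : Decidable (Spec_count_groups_with_max_min_diff a max_min_diff out) := by unfold Spec_count_groups_with_max_min_diff; infer_instance

-- ===== CLAIM (what is proved, stated in full; the proofs are below) =====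
def Claim_equal_count_groups_with_max_min_diff : Prop := ∀ (a : List Int) (max_min_diff : Int), Dom_count_groups_with_max_min_diff a max_min_diff → Pre_count_groups_with_max_min_diff a max_min_diff → Spec_count_groups_with_max_min_diff a max_min_diff (count_groups_with_max_min_diff a max_min_diff)

-- ===== LEMMAS AND PROOFS =====

-- Loop invariant: if B's group is x :: t, then A's running min/max are exactly
-- t.foldl min x / t.foldl max x, and the two folds then return the same count.
theorem pv_loop (d : Int) (rest : List Int) : ∀ (c x : Int) (t : List Int),
    (rest.foldl (fun (st : Int × List Int) num =>
        let g := st.2 ++ [num]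
        if ((PySem.List.max? g (fun y => y)).getD 0)
             - ((PySem.List.min? g (fun y => y)).getD 0) > d then
          (st.1 + 1, [num])
        else (st.1, g)) (c, x :: t)).1
    = (rest.foldl (fun (st : Int × Int × Int) num =>
        let mn := min st.2.1 num
        let mx := max st.2.2 num
        if mx - mn > d then (st.1 + 1, num, num) else (st.1, mn, mx))
        (c, t.foldl min x, t.foldl max x)).1 := by
  induction rest with
  | nil => intro c x t; rfl
  | cons num r ih =>
    intro c x t
    simp only [List.foldl_cons]
    have hx : (x :: t) ++ [num] = x :: (t ++ [num]) := by simp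
    rw [hx, PySem.List.max?_id_cons, PySem.List.min?_id_cons,
        List.foldl_append, List.foldl_append]
    simp only [List.foldl_cons, List.foldl_nil, Option.getD_some]
    by_cases h : max (t.foldl max x) num - min (t.foldl min x) num > d
    · rw [if_pos h, if_pos h]
      simpa using ih (c + 1) num []
    · rw [if_neg h, if_neg h]
      simpa [List.foldl_append] using ih c x (t ++ [num])

-- ===== VERDICT (by name: the statement is the Claim_ definition above) =====
theorem count_groups_with_max_min_diff_spec : Claim_equal_count_groups_with_max_min_diff := by
  intro a d _ hpre
  match a with
  | [] => exact absurd rfl hpre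
  | h :: rest =>
    show count_groups_with_max_min_diff (h :: rest) d = count_groups_with_max_min_diff_alt (h :: rest) d
    unfold count_groups_with_max_min_diff count_groups_with_max_min_diff_alt
    exact (pv_loop d (h :: rest) 1 h []).symm
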